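-- pv_equiv track=rewrite | github.com/taltstidl/scale-equivariant-cnn | trafficsign/process.py | has_enough_samples
-- ===== SOURCE A (Python) =====
-- def has_enough_samples(label, train_counts, val_counts):
--     """ Checks whether enough samples are present. """
--     if label not in train_counts or label not in val_counts:
--         return False  # Label is not present in both training and validation
--     train_counts, val_counts = train_counts[label], val_counts[label]
--     # For training/validation, at least 50 samples in the smaller and larger halves
--     train_count_sm = sum([train_counts.get(s, 0) for s in range(9, 37)])  # Smaller half of scales
--     train_count_lg = sum([train_counts.get(s, 0) for s in range(37, 65)])  # Larger half of scales
--     # For testing, at least 10 samples in the smaller and larger halves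
--     val_count_sm = sum([val_counts.get(s, 0) for s in range(9, 37)])  # Smaller half of scales
--     val_count_lg = sum([val_counts.get(s, 0) for s in range(37, 65)])  # Larger half of scales
--     return train_count_sm >= 50 and train_count_lg >= 50 and val_count_sm >= 10 and val_count_lg >= 10
-- ===== SOURCE B (Python) =====
-- def has_enough_samples(label, train_counts, val_counts):
--     """ Checks whether enough samples are present. """
--     if label not in train_counts or label not in val_counts:
--         return False  # Label is not present in both training and validation
--     def bucket(counts):
--         small = large = 0
--         for scale, n in counts.items():
--             if 9 <= scale < 37:
--                 small += n
--             elif 37 <= scale < 65: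
--                 large += n
--         return small, large
--     t_sm, t_lg = bucket(train_counts[label])
--     v_sm, v_lg = bucket(val_counts[label])
--     return t_sm >= 50 and t_lg >= 50 and v_sm >= 10 and v_lg >= 10
-- ===== Notes on version B (the rewrite author's own statement) =====
-- stated objective: alternative
-- what changed: Replaces the four fixed-range sums of 112 dict probes (get(s,0) for every s in range(9,65)) by one data-driven pass per dict that buckets each present (scale, count) item into a small/large accumulator, skipping out-of-range scales.
import Mathlib
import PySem

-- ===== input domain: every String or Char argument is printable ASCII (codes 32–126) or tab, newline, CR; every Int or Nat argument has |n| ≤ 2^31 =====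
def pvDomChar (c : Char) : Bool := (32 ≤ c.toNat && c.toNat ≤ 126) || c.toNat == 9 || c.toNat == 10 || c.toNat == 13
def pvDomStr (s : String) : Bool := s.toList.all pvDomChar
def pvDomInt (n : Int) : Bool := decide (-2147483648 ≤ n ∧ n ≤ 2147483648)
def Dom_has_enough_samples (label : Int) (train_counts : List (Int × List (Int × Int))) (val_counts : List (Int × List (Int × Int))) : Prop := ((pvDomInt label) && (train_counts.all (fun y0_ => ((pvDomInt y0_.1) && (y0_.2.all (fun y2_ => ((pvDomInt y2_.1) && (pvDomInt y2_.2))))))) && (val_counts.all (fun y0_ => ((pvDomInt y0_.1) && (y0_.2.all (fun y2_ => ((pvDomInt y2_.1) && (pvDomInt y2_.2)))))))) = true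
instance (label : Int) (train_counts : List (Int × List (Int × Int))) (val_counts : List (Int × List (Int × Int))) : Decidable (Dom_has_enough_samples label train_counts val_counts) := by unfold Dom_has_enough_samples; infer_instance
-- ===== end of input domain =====

-- B replaces A's four fixed-range sums of dict probes (range(9,65)) with one bucketing pass
-- over each dict's items (alternative decomposition; same results, not claimed faster).


-- ===== PORT A =====
def has_enough_samples (label : Int) (train_counts : List (Int × List (Int × Int))) (val_counts : List (Int × List (Int × Int))) : Bool :=
  if (train_counts.lookup label).isNone || (val_counts.lookup label).isNone then
    false
  else
    let tc := (train_counts.lookup label).getD []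
    let vc := (val_counts.lookup label).getD []
    let train_count_sm := ((PySem.List.pyRange 9 37 1).map (fun s => (tc.lookup s).getD 0)).sum
    let train_count_lg := ((PySem.List.pyRange 37 65 1).map (fun s => (tc.lookup s).getD 0)).sum
    let val_count_sm := ((PySem.List.pyRange 9 37 1).map (fun s => (vc.lookup s).getD 0)).sum
    let val_count_lg := ((PySem.List.pyRange 37 65 1).map (fun s => (vc.lookup s).getD 0)).sum
    decide (train_count_sm ≥ 50) && decide (train_count_lg ≥ 50) &&
      decide (val_count_sm ≥ 10) && decide (val_count_lg ≥ 10)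

-- ===== PORT B =====
-- one bucketing step of B's loop over a dict's items
def bucketAdd (acc : Int × Int) (p : Int × Int) : Int × Int :=
  if 9 ≤ p.1 ∧ p.1 < 37 then (acc.1 + p.2, acc.2)
  else if 37 ≤ p.1 ∧ p.1 < 65 then (acc.1, acc.2 + p.2)
  else acc

def has_enough_samples_alt (label : Int) (train_counts : List (Int × List (Int × Int))) (val_counts : List (Int × List (Int × Int))) : Bool :=
  match train_counts.lookup label, val_counts.lookup label with
  | some tc, some vc =>
    let t := tc.foldl bucketAdd (0, 0)
    let v := vc.foldl bucketAdd (0, 0)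
    decide (t.1 ≥ 50) && decide (t.2 ≥ 50) && decide (v.1 ≥ 10) && decide (v.2 ≥ 10)
  | _, _ => false

-- ===== PRECONDITION & SPEC =====
-- Pre_ excludes association lists whose inner scale->count list repeats a key: a Python dict can
-- never contain duplicate keys, so such lists correspond to no Python input of A.
def Pre_has_enough_samples (label : Int) (train_counts : List (Int × List (Int × Int))) (val_counts : List (Int × List (Int × Int))) : Prop :=
  (∀ p ∈ train_counts, (p.2.map Prod.fst).Nodup) ∧ (∀ p ∈ val_counts, (p.2.map Prod.fst).Nodup)
instance (label : Int) (train_counts : List (Int × List (Int × Int))) (val_counts : List (Int × List (Int × Int))) : Decidable (Pre_has_enough_samples label train_counts val_counts) := by unfold Pre_has_enough_samples; infer_instance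

def pvWitness_has_enough_samples : Int × (List (Int × List (Int × Int))) × (List (Int × List (Int × Int))) :=
  (1, [(1, [(10, 60), (40, 60)])], [(1, [(10, 10), (40, 10)])])

def Spec_has_enough_samples (label : Int) (train_counts : List (Int × List (Int × Int))) (val_counts : List (Int × List (Int × Int))) (out : Bool) : Prop := out = has_enough_samples_alt label train_counts val_counts
instance (label : Int) (train_counts : List (Int × List (Int × Int))) (val_counts : List (Int × List (Int × Int))) (out : Bool) : Decidable (Spec_has_enough_samples label train_counts val_counts out) := by unfold Spec_has_enough_samples; infer_instance

-- ===== CLAIM (what is proved, stated in full; the proofs are below) =====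
def Claim_equal_has_enough_samples : Prop := ∀ (label : Int) (train_counts : List (Int × List (Int × Int))) (val_counts : List (Int × List (Int × Int))), Dom_has_enough_samples label train_counts val_counts → Pre_has_enough_samples label train_counts val_counts → Spec_has_enough_samples label train_counts val_counts (has_enough_samples label train_counts val_counts)

-- ===== LEMMAS AND PROOFS =====

-- peeling one fresh entry off the dict shifts the range-sum by its count if its key is in range
lemma sum_lookup_cons (L : List Int) (hL : L.Nodup) (k v : Int) (rest : List (Int × Int))
    (hk : rest.lookup k = none) :
    (L.map (fun s => ((((k, v) :: rest).lookup s).getD 0))).sum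
      = (if k ∈ L then v else 0) + (L.map (fun s => ((rest.lookup s).getD 0))).sum := by
  induction L with
  | nil => simp
  | cons s L ih =>
    have hL' := hL.of_cons
    have hsL : s ∉ L := (List.nodup_cons.mp hL).1
    by_cases hsk : s = k
    · subst hsk
      have h1 : ((((s, v) :: rest).lookup s).getD 0) = v := by simp [List.lookup]
      have h2 : ((rest.lookup s).getD 0) = 0 := by simp [hk]
      simp [List.map_cons, List.sum_cons, ih hL', h2, hsL]
    · have hks : ¬ k = s := fun h => hsk h.symm
      have h1 : ((((k, v) :: rest).lookup s).getD 0) = ((rest.lookup s).getD 0) := by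
        have hb : (s == k) = false := by simp [hsk]
        simp [List.lookup, hb]
      simp only [List.map_cons, List.sum_cons, h1, ih hL', List.mem_cons]
      by_cases hkL : k ∈ L
      · simp [hkL, hks]
        ring
      · simp [hkL, hks]

-- B's fold over the items computes exactly A's two range-sums (given unique keys)
lemma bucket_eq (d : List (Int × Int)) (hd : (d.map Prod.fst).Nodup) (a b : Int) :
    d.foldl bucketAdd (a, b)
      = (a + ((PySem.List.pyRange 9 37 1).map (fun s => ((d.lookup s).getD 0))).sum,
         b + ((PySem.List.pyRange 37 65 1).map (fun s => ((d.lookup s).getD 0))).sum) := by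
  induction d generalizing a b with
  | nil => simp [List.lookup]
  | cons p rest ih =>
    obtain ⟨k, v⟩ := p
    have hk : k ∉ rest.map Prod.fst := (List.nodup_cons.mp hd).1
    have hrest : (rest.map Prod.fst).Nodup := (List.nodup_cons.mp hd).2
    have hnone : rest.lookup k = none := by
      rw [List.lookup_eq_none_iff]
      intro q hq
      simp only [bne_iff_ne, ne_eq]
      intro h; exact hk (h ▸ List.mem_map_of_mem hq)
    rw [List.foldl_cons, ih hrest,
        sum_lookup_cons _ (PySem.List.nodup_pyRange_one 9 37) k v rest hnone,
        sum_lookup_cons _ (PySem.List.nodup_pyRange_one 37 65) k v rest hnone]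
    simp only [PySem.List.mem_pyRange_one, bucketAdd]
    by_cases h1 : 9 ≤ k ∧ k < 37
    · have h2 : ¬ (37 ≤ k ∧ k < 65) := by omega
      simp [h1, h2]; ring
    · by_cases h2 : 37 ≤ k ∧ k < 65
      · simp [h1, h2]; ring
      · simp [h1, h2]

lemma mem_of_lookup_some {k : Int} {v : List (Int × Int)} {d : List (Int × List (Int × Int))}
    (h : d.lookup k = some v) : (k, v) ∈ d := by
  obtain ⟨l₁, l₂, hEq, -⟩ := List.lookup_eq_some_iff.mp h
  subst hEq; simp

-- ===== VERDICT (by name: the statement is the Claim_ definition above) =====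
theorem has_enough_samples_spec : Claim_equal_has_enough_samples := by
  intro label train_counts val_counts _ hPre
  unfold Spec_has_enough_samples has_enough_samples has_enough_samples_alt
  rcases htc : train_counts.lookup label with _ | tc
  · simp
  rcases hvc : val_counts.lookup label with _ | vc
  · simp
  have htN : (tc.map Prod.fst).Nodup := hPre.1 _ (mem_of_lookup_some htc)
  have hvN : (vc.map Prod.fst).Nodup := hPre.2 _ (mem_of_lookup_some hvc)
  simp only [Option.isNone_some, Bool.or_self, Bool.false_eq_true, if_false,
    Option.getD_some, bucket_eq tc htN 0 0, bucket_eq vc hvN 0 0, zero_add]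
  rfl
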